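-- pv_equiv track=rewrite | github.com/fernandopdc30/Compiladores_2024_B | Verifi_Tipos/Sintactico.py | definirTipo
-- ===== SOURCE A (Python) =====
-- subtipos = {
--     "NUM_BOOLEANOF": [],
--     "NUM_BOOLEANOV": ["NUM_ENTERO"],
--     "NUM_ENTERO": ["NUM_BOOLEANOF"],
--     "CADENA_TEXTO": [],
--     "NUM_DECIMAL": ['NUM_ENTERO']
-- }
--
-- def definirTipo(tipo1, tipo2):
--     if tipo1 == tipo2:
--         return tipo1
--
--     def buscar_subtipo(tipo_actual, tipo_objetivo):
--         if tipo_actual == tipo_objetivo: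
--             return True
--         for subtipo in subtipos.get(tipo_actual, []):
--             if buscar_subtipo(subtipo, tipo_objetivo):
--                 return True
--         return False
--
--     if buscar_subtipo(tipo1, tipo2):
--         return tipo1
--
--     if buscar_subtipo(tipo2, tipo1):
--         return tipo2
--     return None
-- ===== SOURCE B (Python) =====
-- subtipos = {
--     "NUM_BOOLEANOF": [],
--     "NUM_BOOLEANOV": ["NUM_ENTERO"],
--     "NUM_ENTERO": ["NUM_BOOLEANOF"],
--     "CADENA_TEXTO": [],
--     "NUM_DECIMAL": ['NUM_ENTERO']
-- }
--
-- def definirTipo(tipo1, tipo2):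
--     if tipo1 == tipo2:
--         return tipo1
--
--     def alcanza(inicio, objetivo):
--         stack = [inicio]
--         visitado = {inicio}
--         while stack:
--             actual = stack.pop()
--             if actual == objetivo:
--                 return True
--             for hijo in subtipos.get(actual, []):
--                 if hijo not in visitado:
--                     visitado.add(hijo)
--                     stack.append(hijo)
--         return False
--
--     if alcanza(tipo1, tipo2):
--         return tipo1
--     if alcanza(tipo2, tipo1):
--         return tipo2
--     return None
-- ===== Notes on version B (the rewrite author's own statement) =====
-- stated objective: idiomatic
-- what changed: The recursive DFS helper buscar_subtipo is replaced by an iterative explicit-stack worklist search with a visited set (no recursion).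
import Mathlib
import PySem

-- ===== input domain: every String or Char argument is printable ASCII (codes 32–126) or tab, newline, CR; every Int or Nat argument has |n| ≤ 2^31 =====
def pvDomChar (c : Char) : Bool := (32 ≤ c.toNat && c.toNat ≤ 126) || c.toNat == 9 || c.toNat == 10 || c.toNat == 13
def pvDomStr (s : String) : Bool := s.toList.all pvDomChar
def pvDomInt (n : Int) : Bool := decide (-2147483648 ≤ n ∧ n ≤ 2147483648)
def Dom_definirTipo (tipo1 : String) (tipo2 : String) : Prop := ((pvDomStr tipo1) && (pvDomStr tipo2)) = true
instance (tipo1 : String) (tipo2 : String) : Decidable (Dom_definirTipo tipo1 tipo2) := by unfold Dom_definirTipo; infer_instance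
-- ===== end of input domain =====

-- B replaces the recursive DFS helper with an iterative explicit-stack search with a visited set (idiomatic worklist form); same results.


-- ===== PORT A =====
-- the module-level dict 'subtipos'
def subtipos : PySem.Dict String (List String) :=
  PySem.Dict.ofList [("NUM_BOOLEANOF", []),
   ("NUM_BOOLEANOV", ["NUM_ENTERO"]),
   ("NUM_ENTERO", ["NUM_BOOLEANOF"]),
   ("CADENA_TEXTO", []),
   ("NUM_DECIMAL", ["NUM_ENTERO"])]

-- recursive helper of A; the fuel only makes the recursion total (the fixed
-- graph is acyclic with depth < 8, so fuel 8 is never exhausted)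
def buscarSubtipo : Nat → String → String → Bool
  | 0, _, _ => false
  | n + 1, tipoActual, tipoObjetivo =>
    if tipoActual == tipoObjetivo then true
    else (PySem.Dict.getD subtipos tipoActual []).any
           (fun subtipo => buscarSubtipo n subtipo tipoObjetivo)

def definirTipo (tipo1 : String) (tipo2 : String) : Option String :=
  if tipo1 == tipo2 then some tipo1
  else if buscarSubtipo 8 tipo1 tipo2 then some tipo1
  else if buscarSubtipo 8 tipo2 tipo1 then some tipo2
  else none

-- ===== PORT B =====
-- push each not-yet-visited child onto the stack, marking it visited
def pushHijos (vis : PySem.Set String) (stack : List String) :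
    List String → PySem.Set String × List String
  | [] => (vis, stack)
  | c :: cs =>
    if PySem.Set.contains vis c then pushHijos vis stack cs
    else pushHijos (PySem.Set.add vis c) (c :: stack) cs

-- the while loop of B's alcanza; fuel 16 only makes it total (at most 6
-- distinct strings ever enter the visited set, so ≤ 7 iterations occur)
def loopAlcanza : Nat → List String → PySem.Set String → String → Bool
  | 0, _, _, _ => false
  | _ + 1, [], _, _ => false
  | n + 1, actual :: rest, vis, objetivo =>
    if actual == objetivo then true
    else
      let p := pushHijos vis rest (PySem.Dict.getD subtipos actual [])
      loopAlcanza n p.2 p.1 objetivo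

def alcanza (inicio objetivo : String) : Bool :=
  loopAlcanza 16 [inicio] (PySem.Set.ofList [inicio]) objetivo

def definirTipo_alt (tipo1 : String) (tipo2 : String) : Option String :=
  if tipo1 == tipo2 then some tipo1
  else if alcanza tipo1 tipo2 then some tipo1
  else if alcanza tipo2 tipo1 then some tipo2
  else none

-- ===== PRECONDITION & SPEC =====
def Spec_definirTipo (tipo1 : String) (tipo2 : String) (out : Option String) : Prop := out = definirTipo_alt tipo1 tipo2
instance (tipo1 : String) (tipo2 : String) (out : Option String) : Decidable (Spec_definirTipo tipo1 tipo2 out) := by unfold Spec_definirTipo; infer_instance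

-- ===== CLAIM (what is proved, stated in full; the proofs are below) =====
def Claim_equal_definirTipo : Prop := ∀ (tipo1 : String) (tipo2 : String), Dom_definirTipo tipo1 tipo2 → Spec_definirTipo tipo1 tipo2 (definirTipo tipo1 tipo2)

-- ===== LEMMAS AND PROOFS =====

-- strings that are not keys of 'subtipos' have no children
lemma subtipos_eq_mk : subtipos = PySem.Dict.mk
    [("NUM_BOOLEANOF", []), ("NUM_BOOLEANOV", ["NUM_ENTERO"]), ("NUM_ENTERO", ["NUM_BOOLEANOF"]),
     ("CADENA_TEXTO", []), ("NUM_DECIMAL", ["NUM_ENTERO"])] := by decide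

lemma getD_subtipos_of_not_key (t : String)
    (h1 : t ≠ "NUM_BOOLEANOF") (h2 : t ≠ "NUM_BOOLEANOV") (h3 : t ≠ "NUM_ENTERO")
    (h4 : t ≠ "CADENA_TEXTO") (h5 : t ≠ "NUM_DECIMAL") :
    PySem.Dict.getD subtipos t [] = [] := by
  simp [subtipos_eq_mk, PySem.Dict.getD, PySem.Dict.get?_mk_cons,
    Ne.symm h1, Ne.symm h2, Ne.symm h3, Ne.symm h4, Ne.symm h5, PySem.Dict.get?]

-- both searches agree for every start and every target string
lemma buscar_eq_alcanza (t o : String) : buscarSubtipo 8 t o = alcanza t o := by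
  by_cases h1 : t = "NUM_BOOLEANOF"
  · subst h1
    by_cases ho0 : o = "NUM_BOOLEANOF" <;>
      simp [alcanza, loopAlcanza, buscarSubtipo, pushHijos, subtipos_eq_mk,
        PySem.Dict.getD, PySem.Dict.get?, PySem.Dict.get?_mk_cons, ho0]
  by_cases h2 : t = "NUM_BOOLEANOV"
  · subst h2
    by_cases ho0 : o = "NUM_BOOLEANOV" <;> by_cases ho1 : o = "NUM_ENTERO" <;>
        by_cases ho2 : o = "NUM_BOOLEANOF" <;>
      first
      | (subst ho0; decide)
      | (subst ho1; decide)
      | (subst ho2; decide)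
      | simp [alcanza, loopAlcanza, buscarSubtipo, pushHijos, subtipos_eq_mk,
          PySem.Dict.getD, PySem.Dict.get?, PySem.Dict.get?_mk_cons, PySem.Set.contains,
          PySem.Set.add, PySem.Set.ofList, ho0, ho1, ho2,
          Ne.symm ho0, Ne.symm ho1, Ne.symm ho2]
  by_cases h3 : t = "NUM_ENTERO"
  · subst h3
    by_cases ho0 : o = "NUM_ENTERO" <;> by_cases ho2 : o = "NUM_BOOLEANOF" <;>
      first
      | (subst ho0; decide)
      | (subst ho2; decide)
      | simp [alcanza, loopAlcanza, buscarSubtipo, pushHijos, subtipos_eq_mk,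
          PySem.Dict.getD, PySem.Dict.get?, PySem.Dict.get?_mk_cons, PySem.Set.contains,
          PySem.Set.add, PySem.Set.ofList, ho0, ho2, Ne.symm ho0, Ne.symm ho2]
  by_cases h4 : t = "CADENA_TEXTO"
  · subst h4
    by_cases ho0 : o = "CADENA_TEXTO" <;>
      simp [alcanza, loopAlcanza, buscarSubtipo, pushHijos, subtipos_eq_mk,
        PySem.Dict.getD, PySem.Dict.get?, PySem.Dict.get?_mk_cons, ho0]
  by_cases h5 : t = "NUM_DECIMAL"
  · subst h5
    by_cases ho0 : o = "NUM_DECIMAL" <;> by_cases ho1 : o = "NUM_ENTERO" <;>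
        by_cases ho2 : o = "NUM_BOOLEANOF" <;>
      first
      | (subst ho0; decide)
      | (subst ho1; decide)
      | (subst ho2; decide)
      | simp [alcanza, loopAlcanza, buscarSubtipo, pushHijos, subtipos_eq_mk,
          PySem.Dict.getD, PySem.Dict.get?, PySem.Dict.get?_mk_cons, PySem.Set.contains,
          PySem.Set.add, PySem.Set.ofList, ho0, ho1, ho2,
          Ne.symm ho0, Ne.symm ho1, Ne.symm ho2]
  · have hnil := getD_subtipos_of_not_key t h1 h2 h3 h4 h5
    simp [alcanza, loopAlcanza, buscarSubtipo, pushHijos, hnil]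

-- ===== VERDICT (by name: the statement is the Claim_ definition above) =====
theorem definirTipo_spec : Claim_equal_definirTipo := by
  intro t1 t2 _
  unfold Spec_definirTipo definirTipo definirTipo_alt
  rw [buscar_eq_alcanza, buscar_eq_alcanza]
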